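-- pv_equiv track=rewrite | github.com/aradhyapavan/CAI_Assignment_2_Group_23_Travel_ChatBot | pages/3.Travel Database Querying and Integration (Task_3).py | map_intent_to_service
-- ===== SOURCE A (Python) =====
-- def map_intent_to_service(intent):
--     service_categories = {
--         "flight": ["flight_booking", "flight_inquiry", "flight_cancellation", "flight_status", "flight_change"],
--         "hotel": ["hotel_booking", "hotel_inquiry", "hotel_cancellation", "hotel_upgrade", "hotel_amenities"],
--         "car_rental": ["car_rental", "car_inquiry", "car_cancellation", "car_extension", "car_price"],
--         "travel_advisory": ["travel_advisory", "weather_advisory", "health_advisory", "political_unrest_advisory", "covid_restrictions"]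
--     }
--
--     intent_service_map = {
--         "flight_booking": "Book a flight",
--         "flight_inquiry": "Flight availability inquiry",
--         "flight_cancellation": "Cancel a flight",
--         "flight_status": "Check flight status",
--         "flight_change": "Change flight details",
--         "hotel_booking": "Book a hotel",
--         "hotel_inquiry": "Hotel availability inquiry",
--         "hotel_cancellation": "Cancel a hotel reservation",
--         "hotel_upgrade": "Upgrade hotel room",
--         "hotel_amenities": "Inquire about hotel amenities",
--         "car_rental": "Rent a car",
--         "car_inquiry": "Car availability inquiry",
--         "car_cancellation": "Cancel car rental",
--         "car_extension": "Extend car rental period",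
--         "car_price": "Check car rental prices",
--         "travel_advisory": "Get travel advisory information",
--         "weather_advisory": "Get weather advisory",
--         "health_advisory": "Get health advisory",
--         "political_unrest_advisory": "Get political unrest advisory",
--         "covid_restrictions": "Get COVID-19 travel restrictions"
--     }
--
--     for category, intents in service_categories.items():
--         if intent in intents:
--             return intent_service_map[intent], category
--
--     return "Unknown service", "unknown"
-- ===== SOURCE B (Python) =====
-- def map_intent_to_service(intent):
--     intent_service_map = {
--         "flight_booking": "Book a flight",
--         "flight_inquiry": "Flight availability inquiry",
--         "flight_cancellation": "Cancel a flight",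
--         "flight_status": "Check flight status",
--         "flight_change": "Change flight details",
--         "hotel_booking": "Book a hotel",
--         "hotel_inquiry": "Hotel availability inquiry",
--         "hotel_cancellation": "Cancel a hotel reservation",
--         "hotel_upgrade": "Upgrade hotel room",
--         "hotel_amenities": "Inquire about hotel amenities",
--         "car_rental": "Rent a car",
--         "car_inquiry": "Car availability inquiry",
--         "car_cancellation": "Cancel car rental",
--         "car_extension": "Extend car rental period",
--         "car_price": "Check car rental prices",
--         "travel_advisory": "Get travel advisory information",
--         "weather_advisory": "Get weather advisory",
--         "health_advisory": "Get health advisory",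
--         "political_unrest_advisory": "Get political unrest advisory",
--         "covid_restrictions": "Get COVID-19 travel restrictions"
--     }
--
--     desc = intent_service_map.get(intent)
--     if desc is None:
--         return "Unknown service", "unknown"
--     # For every known intent the owning category is determined by its name prefix:
--     # flight_* -> flight, hotel_* -> hotel, car_* -> car_rental, the rest are advisories.
--     if intent.startswith("flight_"):
--         category = "flight"
--     elif intent.startswith("hotel_"):
--         category = "hotel"
--     elif intent.startswith("car_"):
--         category = "car_rental"
--     else:
--         category = "travel_advisory"
--     return desc, category
-- ===== Notes on version B (the rewrite author's own statement) =====
-- stated objective: simpler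
-- what changed: B drops the category table and loop entirely: one description lookup, then the category is computed from the intent's name prefix (flight_/hotel_/car_, otherwise travel_advisory), which is provably consistent with A's table for all 20 known intents.
import Mathlib
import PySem

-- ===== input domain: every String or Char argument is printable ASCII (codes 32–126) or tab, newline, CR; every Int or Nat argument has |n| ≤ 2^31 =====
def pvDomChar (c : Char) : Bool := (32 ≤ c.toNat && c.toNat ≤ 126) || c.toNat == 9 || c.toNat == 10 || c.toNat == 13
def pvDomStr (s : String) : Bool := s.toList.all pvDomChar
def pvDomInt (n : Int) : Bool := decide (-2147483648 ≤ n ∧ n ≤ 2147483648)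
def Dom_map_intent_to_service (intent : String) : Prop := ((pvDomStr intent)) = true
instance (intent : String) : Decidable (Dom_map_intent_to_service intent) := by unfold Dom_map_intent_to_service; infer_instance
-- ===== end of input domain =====

-- B drops A's category table and scan: one description lookup, then the category is derived from the intent's name prefix; objective: simpler.

-- ===== PORT A =====
def pvServiceCategories : PySem.Dict String (List String) := PySem.Dict.mk
  [("flight", ["flight_booking", "flight_inquiry", "flight_cancellation", "flight_status", "flight_change"]),
   ("hotel", ["hotel_booking", "hotel_inquiry", "hotel_cancellation", "hotel_upgrade", "hotel_amenities"]),
   ("car_rental", ["car_rental", "car_inquiry", "car_cancellation", "car_extension", "car_price"]),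
   ("travel_advisory", ["travel_advisory", "weather_advisory", "health_advisory", "political_unrest_advisory", "covid_restrictions"])]

def pvIntentServiceMap : PySem.Dict String String := PySem.Dict.mk
  [("flight_booking", "Book a flight"),
   ("flight_inquiry", "Flight availability inquiry"),
   ("flight_cancellation", "Cancel a flight"),
   ("flight_status", "Check flight status"),
   ("flight_change", "Change flight details"),
   ("hotel_booking", "Book a hotel"),
   ("hotel_inquiry", "Hotel availability inquiry"),
   ("hotel_cancellation", "Cancel a hotel reservation"),
   ("hotel_upgrade", "Upgrade hotel room"),
   ("hotel_amenities", "Inquire about hotel amenities"),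
   ("car_rental", "Rent a car"),
   ("car_inquiry", "Car availability inquiry"),
   ("car_cancellation", "Cancel car rental"),
   ("car_extension", "Extend car rental period"),
   ("car_price", "Check car rental prices"),
   ("travel_advisory", "Get travel advisory information"),
   ("weather_advisory", "Get weather advisory"),
   ("health_advisory", "Get health advisory"),
   ("political_unrest_advisory", "Get political unrest advisory"),
   ("covid_restrictions", "Get COVID-19 travel restrictions")]

-- A's loop: for (category, intents) in service_categories.items(): if intent in intents: return (...).
-- intent_service_map[intent] cannot raise here (membership in intents guarantees the key), so getD's default is unreachable.
def pvALoop (intent : String) : List (String × List String) → String × String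
  | [] => ("Unknown service", "unknown")
  | (category, intents) :: rest =>
      if intent ∈ intents then (PySem.Dict.getD pvIntentServiceMap intent "", category)
      else pvALoop intent rest

def map_intent_to_service (intent : String) : String × String :=
  pvALoop intent pvServiceCategories.items

-- ===== PORT B =====
-- B's single flat table intent -> description (same literal dict as Source B's intent_service_map)
def pvIntentServiceMapB : PySem.Dict String String := PySem.Dict.mk
  [("flight_booking", "Book a flight"),
   ("flight_inquiry", "Flight availability inquiry"),
   ("flight_cancellation", "Cancel a flight"),
   ("flight_status", "Check flight status"),
   ("flight_change", "Change flight details"),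
   ("hotel_booking", "Book a hotel"),
   ("hotel_inquiry", "Hotel availability inquiry"),
   ("hotel_cancellation", "Cancel a hotel reservation"),
   ("hotel_upgrade", "Upgrade hotel room"),
   ("hotel_amenities", "Inquire about hotel amenities"),
   ("car_rental", "Rent a car"),
   ("car_inquiry", "Car availability inquiry"),
   ("car_cancellation", "Cancel car rental"),
   ("car_extension", "Extend car rental period"),
   ("car_price", "Check car rental prices"),
   ("travel_advisory", "Get travel advisory information"),
   ("weather_advisory", "Get weather advisory"),
   ("health_advisory", "Get health advisory"),
   ("political_unrest_advisory", "Get political unrest advisory"),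
   ("covid_restrictions", "Get COVID-19 travel restrictions")]

def map_intent_to_service_alt (intent : String) : String × String :=
  match PySem.Dict.get? pvIntentServiceMapB intent with
  | none => ("Unknown service", "unknown")
  | some desc =>
      if PySem.Str.startswith intent "flight_" then (desc, "flight")
      else if PySem.Str.startswith intent "hotel_" then (desc, "hotel")
      else if PySem.Str.startswith intent "car_" then (desc, "car_rental")
      else (desc, "travel_advisory")

-- ===== PRECONDITION & SPEC =====
def Spec_map_intent_to_service (intent : String) (out : String × String) : Prop := out = map_intent_to_service_alt intent
instance (intent : String) (out : String × String) : Decidable (Spec_map_intent_to_service intent out) := by unfold Spec_map_intent_to_service; infer_instance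

-- ===== CLAIM (what is proved, stated in full; the proofs are below) =====
def Claim_equal_map_intent_to_service : Prop := ∀ (intent : String), Dom_map_intent_to_service intent → Spec_map_intent_to_service intent (map_intent_to_service intent)

-- ===== LEMMAS AND PROOFS =====

theorem map_intent_to_service_eq_alt (intent : String) :
    map_intent_to_service intent = map_intent_to_service_alt intent := by
  by_cases h1 : intent = "flight_booking"; · subst h1; decide
  by_cases h2 : intent = "flight_inquiry"; · subst h2; decide
  by_cases h3 : intent = "flight_cancellation"; · subst h3; decide
  by_cases h4 : intent = "flight_status"; · subst h4; decide
  by_cases h5 : intent = "flight_change"; · subst h5; decide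
  by_cases h6 : intent = "hotel_booking"; · subst h6; decide
  by_cases h7 : intent = "hotel_inquiry"; · subst h7; decide
  by_cases h8 : intent = "hotel_cancellation"; · subst h8; decide
  by_cases h9 : intent = "hotel_upgrade"; · subst h9; decide
  by_cases h10 : intent = "hotel_amenities"; · subst h10; decide
  by_cases h11 : intent = "car_rental"; · subst h11; decide
  by_cases h12 : intent = "car_inquiry"; · subst h12; decide
  by_cases h13 : intent = "car_cancellation"; · subst h13; decide
  by_cases h14 : intent = "car_extension"; · subst h14; decide
  by_cases h15 : intent = "car_price"; · subst h15; decide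
  by_cases h16 : intent = "travel_advisory"; · subst h16; decide
  by_cases h17 : intent = "weather_advisory"; · subst h17; decide
  by_cases h18 : intent = "health_advisory"; · subst h18; decide
  by_cases h19 : intent = "political_unrest_advisory"; · subst h19; decide
  by_cases h20 : intent = "covid_restrictions"; · subst h20; decide
  -- intent matches none of the 20 keys: A falls through its scan, B's lookup misses
  simp [map_intent_to_service, map_intent_to_service_alt, pvALoop, pvServiceCategories,
        pvIntentServiceMapB, PySem.Dict.get?,
        h1, h2, h3, h4, h5, h6, h7, h8, h9, h10,
        h11, h12, h13, h14, h15, h16, h17, h18, h19, h20,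
        Ne.symm h1, Ne.symm h2, Ne.symm h3, Ne.symm h4, Ne.symm h5, Ne.symm h6, Ne.symm h7,
        Ne.symm h8, Ne.symm h9, Ne.symm h10, Ne.symm h11, Ne.symm h12, Ne.symm h13, Ne.symm h14,
        Ne.symm h15, Ne.symm h16, Ne.symm h17, Ne.symm h18, Ne.symm h19, Ne.symm h20]

-- ===== VERDICT (by name: the statement is the Claim_ definition above) =====
theorem map_intent_to_service_spec : Claim_equal_map_intent_to_service := by
  intro intent _
  unfold Spec_map_intent_to_service
  exact map_intent_to_service_eq_alt intent
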